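-- pv_equiv track=rewrite | github.com/LordOfReinkeness/advent-of-code | challenges/_2024/_21/part_1.py | get_moves_to_key
-- ===== SOURCE A (Python) =====
-- keypads =[
-- 	[['7', '8', '9'],['4', '5', '6'], ['1', '2', '3'], [None, '0', 'A']],
-- 	[[None, '^', 'A'], ['<', 'v', '>']]
-- ]
--
-- keypad_lookup_tables = [
-- 	{'7': [0, 0], '8': [1, 0], '9': [2, 0], '4': [0, 1], '5': [1, 1], '6': [2, 1], '1': [0, 2], '2': [1, 2], '3': [2, 2], '0': [1, 3], 'A': [2, 3]},
-- 	{'^': [1, 0], 'A': [2, 0], '<': [0, 1], 'v': [1, 1], '>': [2, 1]}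
-- ]
--
-- def get_moves_to_key(start_key: str, end_key: str, keypad_id):
--
-- 	if start_key == end_key:
-- 		return 'A'
--
-- 	start_coordinates = keypad_lookup_tables[keypad_id][start_key]
-- 	end_coordinates = keypad_lookup_tables[keypad_id][end_key]
--
-- 	out = ''
--
-- 	# chek if z mmovements hits None
-- 	hit_none = False
--
-- 	if start_coordinates[0] != end_coordinates[0]:
-- 		x_tmp = start_coordinates[0]
-- 		x_move = int((end_coordinates[0] - start_coordinates[0]) / abs(end_coordinates[0] - start_coordinates[0]))
-- 		while x_tmp != end_coordinates[0]:
-- 			x_tmp += x_move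
--
-- 			if keypads[keypad_id][start_coordinates[1]][x_tmp] is None:
-- 				hit_none = True
-- 				break
-- 	# X-Achsis moves if not hotting None
-- 	if not hit_none:
-- 		x_move = int(end_coordinates[0] - start_coordinates[0])
-- 		if x_move > 0:
-- 			out += '>' * abs(x_move)
-- 		elif x_move < 0:
-- 			out += '<' * abs(x_move)
--
-- 	# Y-Axis moves can be done in one step
-- 	y_move = int(end_coordinates[1] - start_coordinates[1])
-- 	if y_move > 0:
-- 		out += 'v' * abs(y_move)
-- 	elif y_move < 0:
-- 		out += '^' * abs(y_move)
--
-- 	# if None was hit, move X-Axchsis now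
-- 	if hit_none:
-- 		x_move = int(end_coordinates[0] - start_coordinates[0])
-- 		if x_move > 0:
-- 			out += '>' * abs(x_move)
-- 		elif x_move < 0:
-- 			out += '<' * abs(x_move)
--
--
-- 	return out + 'A'
-- ===== SOURCE B (Python) =====
-- _COORDS = {
--     0: {'7': (0, 0), '8': (1, 0), '9': (2, 0), '4': (0, 1), '5': (1, 1), '6': (2, 1),
--         '1': (0, 2), '2': (1, 2), '3': (2, 2), '0': (1, 3), 'A': (2, 3)},
--     1: {'^': (1, 0), 'A': (2, 0), '<': (0, 1), 'v': (1, 1), '>': (2, 1)},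
-- }
-- _GAP_ROW = {0: 3, 1: 0}
--
-- def get_moves_to_key(start_key: str, end_key: str, keypad_id):
--     if start_key == end_key:
--         return 'A'
--     sx, sy = _COORDS[keypad_id][start_key]
--     ex, ey = _COORDS[keypad_id][end_key]
--     horiz = '>' * (ex - sx) if ex > sx else '<' * (sx - ex)
--     vert = 'v' * (ey - sy) if ey > sy else '^' * (sy - ey)
--     if sy == _GAP_ROW[keypad_id] and ex == 0:
--         return vert + horiz + 'A'
--     return horiz + vert + 'A'
-- ===== Notes on version B (the rewrite author's own statement) =====
-- stated objective: simpler
-- what changed: B replaces A's step-by-step while-loop scan of the keypad row for the gap (and A's three duplicated '>'/'<' emission blocks) with a direct closed-form test (start row equals the keypad's gap row and target column is 0) that picks vertical-then-horizontal vs horizontal-then-vertical over two precomputed move strings.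
-- outside the precondition, e.g. on get_moves_to_key('^', 'A', -1): A returns '>A', B raises KeyError
import Mathlib
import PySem

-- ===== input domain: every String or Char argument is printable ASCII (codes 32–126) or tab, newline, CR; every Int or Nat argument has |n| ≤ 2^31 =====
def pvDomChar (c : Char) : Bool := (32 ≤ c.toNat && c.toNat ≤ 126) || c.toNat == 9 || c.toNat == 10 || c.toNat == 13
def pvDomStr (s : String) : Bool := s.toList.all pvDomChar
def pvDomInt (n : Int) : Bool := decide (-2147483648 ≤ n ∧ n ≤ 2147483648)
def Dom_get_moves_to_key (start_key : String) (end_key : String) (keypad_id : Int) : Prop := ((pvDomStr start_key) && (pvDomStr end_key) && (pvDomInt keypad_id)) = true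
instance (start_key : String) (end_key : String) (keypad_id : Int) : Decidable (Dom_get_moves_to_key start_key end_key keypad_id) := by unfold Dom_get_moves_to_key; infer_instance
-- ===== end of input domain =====

-- B replaces A's step-by-step gap-scanning while-loop with a direct closed-form gap test
-- (objective: simpler); return-value equivalence is proved on Pre_ below.

-- ===== PORT A =====
-- the module constants `keypads` and `keypad_lookup_tables` (coordinates [x, y] ported as pairs (x, y))
def pvKeypads : List (List (List (Option String))) :=
  [[[some "7", some "8", some "9"], [some "4", some "5", some "6"],
    [some "1", some "2", some "3"], [none, some "0", some "A"]],
   [[none, some "^", some "A"], [some "<", some "v", some ">"]]]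

def pvTables : List (PySem.Dict String (Int × Int)) :=
  [PySem.Dict.ofList [("7", (0, 0)), ("8", (1, 0)), ("9", (2, 0)), ("4", (0, 1)), ("5", (1, 1)),
     ("6", (2, 1)), ("1", (0, 2)), ("2", (1, 2)), ("3", (2, 2)), ("0", (1, 3)), ("A", (2, 3))],
   PySem.Dict.ofList [("^", (1, 0)), ("A", (2, 0)), ("<", (0, 1)), ("v", (1, 1)), (">", (2, 1))]]

-- A's while-loop: step x_tmp by x_move until it reaches ex, breaking with `true` on a None cell
-- (fuel = number of remaining steps; inside Pre_ the loop always terminates within it)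
def pvScan : Nat → Int → Int → Int → List (Option String) → Bool
  | 0, _, _, _, _ => false
  | n + 1, x_tmp, ex, move, row =>
    if x_tmp = ex then false
    else
      let x := x_tmp + move
      if PySem.List.pyGet? row x = some none then true
      else pvScan n x ex move row

def get_moves_to_key (start_key : String) (end_key : String) (keypad_id : Int) : String :=
  if start_key = end_key then "A"
  else
    let table := (PySem.List.pyGet? pvTables keypad_id).getD PySem.Dict.empty
    let sc := (PySem.Dict.get? table start_key).getD (0, 0)
    let ec := (PySem.Dict.get? table end_key).getD (0, 0)
    let keypad := (PySem.List.pyGet? pvKeypads keypad_id).getD []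
    let row := (PySem.List.pyGet? keypad sc.2).getD []
    let hit_none :=
      if sc.1 ≠ ec.1 then
        let x_move : Int := if ec.1 - sc.1 > 0 then 1 else -1
        pvScan (ec.1 - sc.1).natAbs sc.1 ec.1 x_move row
      else false
    let x_move := ec.1 - sc.1
    let out : String :=
      if ¬ hit_none then
        if x_move > 0 then String.ofList (List.replicate x_move.natAbs '>')
        else if x_move < 0 then String.ofList (List.replicate x_move.natAbs '<')
        else ""
      else ""
    let y_move := ec.2 - sc.2
    let out := out ++
      (if y_move > 0 then String.ofList (List.replicate y_move.natAbs 'v')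
       else if y_move < 0 then String.ofList (List.replicate y_move.natAbs '^')
       else "")
    let out := if hit_none then
        out ++
          (if x_move > 0 then String.ofList (List.replicate x_move.natAbs '>')
           else if x_move < 0 then String.ofList (List.replicate x_move.natAbs '<')
           else "")
      else out
    out ++ "A"

-- ===== PORT B =====
-- B's constants: coordinate dicts keyed by keypad id, and the row of each keypad's gap
def pvAltCoords : PySem.Dict Int (PySem.Dict String (Int × Int)) :=
  PySem.Dict.ofList
    [(0, PySem.Dict.ofList [("7", (0, 0)), ("8", (1, 0)), ("9", (2, 0)), ("4", (0, 1)), ("5", (1, 1)),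
        ("6", (2, 1)), ("1", (0, 2)), ("2", (1, 2)), ("3", (2, 2)), ("0", (1, 3)), ("A", (2, 3))]),
     (1, PySem.Dict.ofList [("^", (1, 0)), ("A", (2, 0)), ("<", (0, 1)), ("v", (1, 1)), (">", (2, 1))])]

def pvGapRow : PySem.Dict Int Int := PySem.Dict.ofList [(0, 3), (1, 0)]

def get_moves_to_key_alt (start_key : String) (end_key : String) (keypad_id : Int) : String :=
  if start_key = end_key then "A"
  else
    let coords := (PySem.Dict.get? pvAltCoords keypad_id).getD PySem.Dict.empty
    let s := (PySem.Dict.get? coords start_key).getD (0, 0)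
    let e := (PySem.Dict.get? coords end_key).getD (0, 0)
    let horiz := if e.1 > s.1 then String.ofList (List.replicate (e.1 - s.1).natAbs '>')
                 else String.ofList (List.replicate (s.1 - e.1).natAbs '<')
    let vert := if e.2 > s.2 then String.ofList (List.replicate (e.2 - s.2).natAbs 'v')
                else String.ofList (List.replicate (s.2 - e.2).natAbs '^')
    if s.2 = (PySem.Dict.get? pvGapRow keypad_id).getD (-1) ∧ e.1 = 0 then
      vert ++ horiz ++ "A"
    else
      horiz ++ vert ++ "A"

-- ===== PRECONDITION & SPEC =====
-- Pre_ excludes inputs where A raises KeyError/IndexError (unknown keys or keypad_id outside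
-- {0,1} with distinct keys) and the negative keypad_id values (-1, -2) where A's Python list
-- wraparound accidentally selects a keypad while B, keyed by a dict of ids, raises KeyError.
def pvKeysOf (keypad_id : Int) : List String :=
  if keypad_id = 0 then ["7", "8", "9", "4", "5", "6", "1", "2", "3", "0", "A"]
  else ["^", "A", "<", "v", ">"]

def Pre_get_moves_to_key (start_key : String) (end_key : String) (keypad_id : Int) : Prop :=
  start_key = end_key ∨
    ((keypad_id = 0 ∨ keypad_id = 1) ∧
      start_key ∈ pvKeysOf keypad_id ∧ end_key ∈ pvKeysOf keypad_id)
instance (start_key : String) (end_key : String) (keypad_id : Int) : Decidable (Pre_get_moves_to_key start_key end_key keypad_id) := by unfold Pre_get_moves_to_key; infer_instance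

def pvWitness_get_moves_to_key : String × String × Int := ("A", "<", 1)

def Spec_get_moves_to_key (start_key : String) (end_key : String) (keypad_id : Int) (out : String) : Prop := out = get_moves_to_key_alt start_key end_key keypad_id
instance (start_key : String) (end_key : String) (keypad_id : Int) (out : String) : Decidable (Spec_get_moves_to_key start_key end_key keypad_id out) := by unfold Spec_get_moves_to_key; infer_instance

-- ===== CLAIM (what is proved, stated in full; the proofs are below) =====
def Claim_equal_get_moves_to_key : Prop := ∀ (start_key : String) (end_key : String) (keypad_id : Int), Dom_get_moves_to_key start_key end_key keypad_id → Pre_get_moves_to_key start_key end_key keypad_id → Spec_get_moves_to_key start_key end_key keypad_id (get_moves_to_key start_key end_key keypad_id)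

-- ===== LEMMAS AND PROOFS =====

-- ===== VERDICT (by name: the statement is the Claim_ definition above) =====
theorem get_moves_to_key_spec : Claim_equal_get_moves_to_key := by
  intro s e k _ hpre
  unfold Spec_get_moves_to_key
  rcases hpre with h | ⟨hk, hs, he⟩
  · subst h; simp [get_moves_to_key, get_moves_to_key_alt]
  · rcases hk with hk | hk <;> subst hk <;>
      simp only [pvKeysOf, reduceIte] at hs he <;>
      fin_cases hs <;> fin_cases he <;> decide
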